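-- pv_equiv track=rewrite | github.com/agn-bandara/ModBusSim | Nuwans_ModBus_Sim2_v001.py | reconfigure
-- ===== SOURCE A (Python) =====
-- def reconfigure(source_dict):
--     new_dict = {}
--     added_keys = set()
--     # First add all the objects which parent = None
--     for key, value in source_dict.items():
--         if value.get('parent') is None:
--             new_dict[key] = value
--             added_keys.add(key)
--     # Then add the objects whose parent exists in the new_dict
--     while len(added_keys) < len(source_dict):
--         for key, value in source_dict.items():
--             if key not in added_keys and value.get('parent') in new_dict:
--                 new_dict[key] = value
--                 added_keys.add(key)
--     return new_dict
-- ===== SOURCE B (Python) =====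
-- def reconfigure(source_dict):
--     # Worklist cascade: roots go straight to the result; each round scans only
--     # the still-unplaced entries, so placed entries are never rescanned.
--     result = {}
--     pending = []
--     for key, value in source_dict.items():
--         if value.get('parent') is None:
--             result[key] = value
--         else:
--             pending.append((key, value))
--     while pending:
--         remaining = []
--         for key, value in pending:
--             if value.get('parent') in result:
--                 result[key] = value
--             else:
--                 remaining.append((key, value))
--         pending = remaining
--     return result
-- ===== Notes on version B (the rewrite author's own statement) =====
-- stated objective: simpler
-- what changed: replaces A's repeated full rescans of the whole dict guarded by an added-keys set and a length-comparison while loop with a shrinking worklist: roots go straight to the result and each round scans only the still-unplaced entries; Pre_ excludes inputs on which A's while loop never terminates (a key whose parent chain hits a missing key or a cycle) and association lists with duplicate keys, which have no unique Python-dict counterpart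
import Mathlib
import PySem

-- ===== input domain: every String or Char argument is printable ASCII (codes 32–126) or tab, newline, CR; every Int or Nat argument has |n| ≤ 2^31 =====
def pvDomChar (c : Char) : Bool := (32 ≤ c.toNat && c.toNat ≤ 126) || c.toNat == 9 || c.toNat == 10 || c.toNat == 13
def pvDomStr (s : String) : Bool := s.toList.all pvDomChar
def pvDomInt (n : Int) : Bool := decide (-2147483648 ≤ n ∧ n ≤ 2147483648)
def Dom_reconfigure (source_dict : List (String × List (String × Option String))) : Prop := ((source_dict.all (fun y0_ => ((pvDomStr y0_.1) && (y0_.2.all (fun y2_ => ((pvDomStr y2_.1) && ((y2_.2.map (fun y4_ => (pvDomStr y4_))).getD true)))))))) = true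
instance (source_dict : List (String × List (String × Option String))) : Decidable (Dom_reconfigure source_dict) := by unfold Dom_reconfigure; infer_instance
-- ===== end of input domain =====

-- B replaces A's repeated full rescans of the whole dict (with an added-keys set)
-- by a shrinking worklist of still-unplaced entries (objective: simpler; same result).

-- ===== PORT A =====
-- value.get('parent'): returns the stored Optional[str], or None when the field is missing
def pvParent (v : List (String × Option String)) : Option String :=
  ((PySem.Dict.mk v).get? "parent").getD none

-- one full 'for key, value in source_dict.items()' scan of A's while-loop body
def reconfigurePass (source_dict : List (String × List (String × Option String)))
    (st : PySem.Dict String (List (String × Option String)) × PySem.Set String) :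
    PySem.Dict String (List (String × Option String)) × PySem.Set String :=
  source_dict.foldl (fun st kv =>
    if (!(PySem.Set.contains st.2 kv.1)) &&
       (match pvParent kv.2 with
        | some p => st.1.contains p
        | none => false) then
      (st.1.insert kv.1 kv.2, PySem.Set.add st.2 kv.1)
    else st) st

-- 'while len(added_keys) < len(source_dict)': fuel-bounded (fuel only makes the port total;
-- on inputs where Python's loop never terminates — excluded by Pre_ — Python diverges)
def reconfigureWhile (source_dict : List (String × List (String × Option String))) :
    Nat → PySem.Dict String (List (String × Option String)) × PySem.Set String →
    PySem.Dict String (List (String × Option String)) × PySem.Set String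
  | 0, st => st
  | fuel+1, st =>
    if PySem.Set.len st.2 < (source_dict.length : Int) then
      reconfigureWhile source_dict fuel (reconfigurePass source_dict st)
    else st

def reconfigure (source_dict : List (String × List (String × Option String))) :
    List (String × List (String × Option String)) :=
  let init := source_dict.foldl (fun st kv =>
    if pvParent kv.2 = none then (st.1.insert kv.1 kv.2, PySem.Set.add st.2 kv.1) else st)
    ((PySem.Dict.empty : PySem.Dict String (List (String × Option String))), (PySem.Set.empty : PySem.Set String))
  (reconfigureWhile source_dict (source_dict.length + 1) init).1.items

-- ===== PORT B =====
-- the body of Source B's inner 'for key, value in pending' loop: state = (result, remaining);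
-- 'value.get('parent') in result' is False when the parent is None (no string key equals None)
def altStep (st : PySem.Dict String (List (String × Option String)) × List (String × List (String × Option String)))
    (kv : String × List (String × Option String)) :
    PySem.Dict String (List (String × Option String)) × List (String × List (String × Option String)) :=
  match pvParent kv.2 with
  | some p => if st.1.contains p then (st.1.insert kv.1 kv.2, st.2) else (st.1, st.2 ++ [kv])
  | none => (st.1, st.2 ++ [kv])

-- 'while pending:' (fuel only makes the port total; where Python's loop never
-- terminates — excluded by Pre_ — Python diverges)
def altWhile : Nat →
    PySem.Dict String (List (String × Option String)) × List (String × List (String × Option String)) →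
    PySem.Dict String (List (String × Option String))
  | 0, st => st.1
  | fuel+1, st =>
    if st.2 = [] then st.1
    else altWhile fuel (st.2.foldl altStep (st.1, []))

def reconfigure_alt (source_dict : List (String × List (String × Option String))) :
    List (String × List (String × Option String)) :=
  let init := source_dict.foldl (fun st kv =>
      if pvParent kv.2 = none then (st.1.insert kv.1 kv.2, st.2) else (st.1, st.2 ++ [kv]))
    ((PySem.Dict.empty : PySem.Dict String (List (String × Option String))),
     ([] : List (String × List (String × Option String))))
  (altWhile (source_dict.length + 1) init).items

-- ===== PRECONDITION & SPEC =====
-- source_dict[k] (first match)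
def pvLookup (s : List (String × List (String × Option String))) (k : String) :
    Option (List (String × Option String)) := (PySem.Dict.mk s).get? k

-- does k's parent chain reach a parentless key within the given number of steps?
def pvRootedF (s : List (String × List (String × Option String))) :
    Nat → String → Bool
  | 0, _ => false
  | fuel+1, k =>
    match pvLookup s k with
    | none => false
    | some v =>
      match pvParent v with
      | none => true
      | some p => pvRootedF s fuel p

-- Pre_ excludes (a) inputs on which A's (and B's) while loop never terminates — a key whose
-- parent chain hits a missing key or runs in a cycle — and (b) association lists with
-- duplicate keys (outer or inner), which have no unique Python-dict counterpart.
def Pre_reconfigure (source_dict : List (String × List (String × Option String))) : Prop :=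
  (source_dict.map Prod.fst).Nodup ∧
  (∀ kv ∈ source_dict, (kv.2.map Prod.fst).Nodup) ∧
  (∀ kv ∈ source_dict, pvRootedF source_dict source_dict.length kv.1 = true)

instance (source_dict : List (String × List (String × Option String))) : Decidable (Pre_reconfigure source_dict) := by unfold Pre_reconfigure; infer_instance

def pvWitness_reconfigure : (List (String × List (String × Option String))) :=
  [("a", [("parent", none)]), ("b", [("parent", some "a")])]

def Spec_reconfigure (source_dict : List (String × List (String × Option String))) (out : List (String × List (String × Option String))) : Prop := out = reconfigure_alt source_dict
instance (source_dict : List (String × List (String × Option String))) (out : List (String × List (String × Option String))) : Decidable (Spec_reconfigure source_dict out) := by unfold Spec_reconfigure; infer_instance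

-- ===== CLAIM (what is proved, stated in full; the proofs are below) =====
def Claim_equal_reconfigure : Prop := ∀ (source_dict : List (String × List (String × Option String))), Dom_reconfigure source_dict → Pre_reconfigure source_dict → Spec_reconfigure source_dict (reconfigure source_dict)

-- ===== LEMMAS AND PROOFS =====

-- source_dict[k].get('parent')
def pvPar (s : List (String × List (String × Option String))) (k : String) : Option String :=
  match pvLookup s k with
  | some v => pvParent v
  | none => none

-- position of key k in the source order
def pvIdxN (s : List (String × List (String × Option String))) (k : String) : Nat :=
  (s.map Prod.fst).idxOf k

-- the scan pass in which A inserts key k (0 = the initial parentless pass)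
def pvPassF (s : List (String × List (String × Option String))) :
    Nat → String → Nat
  | 0, _ => 0
  | fuel+1, k =>
    match pvPar s k with
    | none => 0
    | some p =>
      let q := pvPassF s fuel p
      if q = 0 ∨ pvIdxN s p ≥ pvIdxN s k then q + 1 else q

def pvGroup (s : List (String × List (String × Option String))) (t : Nat) :
    List (String × List (String × Option String)) :=
  s.filter (fun kv => decide (pvPassF s s.length kv.1 = t))

def pvFlat (s : List (String × List (String × Option String))) (t : Nat) :
    List (String × List (String × Option String)) :=
  (List.range (t+1)).flatMap (pvGroup s)

-- shorthand for the pass number with A's fuel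
def pvPass (s : List (String × List (String × Option String))) (k : String) : Nat :=
  pvPassF s s.length k

-- ---- basic lookup facts ----
theorem pvLookup_of_mem {s : List (String × List (String × Option String))}
    (hnd : (s.map Prod.fst).Nodup) {kv : String × List (String × Option String)}
    (h : kv ∈ s) : pvLookup s kv.1 = some kv.2 := by
  exact PySem.Dict.get?_of_mem_items _ (by simpa using h) (by simpa using hnd)

theorem mem_of_pvLookup {s : List (String × List (String × Option String))} {k : String}
    {v : List (String × Option String)} (h : pvLookup s k = some v) : (k, v) ∈ s := by
  simpa using PySem.Dict.mem_items_of_get?_eq_some _ h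

theorem key_mem_of_pvLookup {s : List (String × List (String × Option String))} {k : String}
    {v : List (String × Option String)} (h : pvLookup s k = some v) : k ∈ s.map Prod.fst := by
  exact List.mem_map.mpr ⟨(k, v), mem_of_pvLookup h, rfl⟩

-- ---- fuel monotonicity / stability ----
theorem pvRootedF_mono {s : List (String × List (String × Option String))} :
    ∀ {f g : Nat} {k : String}, f ≤ g → pvRootedF s f k = true → pvRootedF s g k = true := by
  intro f
  induction f with
  | zero => intro g k _ h; simp [pvRootedF] at h
  | succ f ih =>
    intro g k hfg h
    obtain ⟨g', rfl⟩ : ∃ g', g = g' + 1 := ⟨g - 1, by omega⟩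
    cases hl : pvLookup s k with
    | none => simp [pvRootedF, hl] at h
    | some v =>
      cases hp : pvParent v with
      | none => simp [pvRootedF, hl, hp]
      | some p =>
        simp only [pvRootedF, hl, hp] at h ⊢
        exact ih (by omega) h

theorem pvPassF_stable {s : List (String × List (String × Option String))} :
    ∀ {f : Nat} {k : String}, pvRootedF s f k = true → ∀ {g : Nat}, f ≤ g →
      pvPassF s g k = pvPassF s f k := by
  intro f
  induction f with
  | zero => intro k h; simp [pvRootedF] at h
  | succ f ih =>
    intro k h g hfg
    obtain ⟨g', rfl⟩ : ∃ g', g = g' + 1 := ⟨g - 1, by omega⟩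
    cases hl : pvLookup s k with
    | none => simp [pvRootedF, hl] at h
    | some v =>
      cases hp : pvParent v with
      | none => simp [pvPassF, pvPar, hl, hp]
      | some p =>
        simp only [pvRootedF, hl, hp] at h
        simp only [pvPassF, pvPar, hl, hp]
        rw [ih h (by omega)]

theorem pvPassF_lt {s : List (String × List (String × Option String))} :
    ∀ {f : Nat} {k : String}, pvRootedF s f k = true → pvPassF s f k < f := by
  intro f
  induction f with
  | zero => intro k h; simp [pvRootedF] at h
  | succ f ih =>
    intro k h
    cases hl : pvLookup s k with
    | none => simp [pvRootedF, hl] at h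
    | some v =>
      cases hp : pvParent v with
      | none => simp [pvPassF, pvPar, hl, hp]
      | some p =>
        simp only [pvRootedF, hl, hp] at h
        simp only [pvPassF, pvPar, hl, hp]
        have := ih h
        split <;> omega

theorem key_mem_of_rooted {s : List (String × List (String × Option String))} {f : Nat} {k : String}
    (h : pvRootedF s f k = true) : k ∈ s.map Prod.fst := by
  cases f with
  | zero => simp [pvRootedF] at h
  | succ f =>
    cases hl : pvLookup s k with
    | none => simp [pvRootedF, hl] at h
    | some v => exact key_mem_of_pvLookup hl

-- unfolding the pass number of a child, at A's fuel
theorem pvPass_child {s : List (String × List (String × Option String))} {k p : String}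
    (hR : pvRootedF s s.length k = true) (hp : pvPar s k = some p) :
    pvRootedF s s.length p = true ∧
    pvPass s k = (if pvPass s p = 0 ∨ pvIdxN s p ≥ pvIdxN s k then pvPass s p + 1 else pvPass s p) := by
  have hk := key_mem_of_rooted hR
  obtain ⟨m, hm⟩ : ∃ m, s.length = m + 1 := by
    cases s with
    | nil => simp at hk
    | cons a l => exact ⟨l.length, by simp⟩
  cases hl : pvLookup s k with
  | none => simp [pvPar, hl] at hp
  | some v =>
    have hpv : pvParent v = some p := by simpa [pvPar, hl] using hp
    have hRm : pvRootedF s m p = true := by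
      rw [hm] at hR; simpa only [pvRootedF, hl, hpv] using hR
    have hRp : pvRootedF s s.length p = true := pvRootedF_mono (by omega) hRm
    refine ⟨hRp, ?_⟩
    have hstep : pvPass s k = (if pvPassF s m p = 0 ∨ pvIdxN s p ≥ pvIdxN s k
        then pvPassF s m p + 1 else pvPassF s m p) := by
      unfold pvPass
      rw [hm]
      simp only [pvPassF, pvPar, hl, hpv]
    have hstab : pvPassF s m p = pvPass s p :=
      (pvPassF_stable hRm (by omega)).symm
    rw [hstep, hstab]

theorem pvPass_root {s : List (String × List (String × Option String))} {k : String}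
    (hk : k ∈ s.map Prod.fst) (hp : pvPar s k = none) : pvPass s k = 0 := by
  obtain ⟨m, hm⟩ : ∃ m, s.length = m + 1 := by
    cases s with
    | nil => simp at hk
    | cons a l => exact ⟨l.length, by simp⟩
  unfold pvPass
  rw [hm]
  simp only [pvPassF, hp]

theorem pvPass_lt_length {s : List (String × List (String × Option String))} {k : String}
    (hR : pvRootedF s s.length k = true) : pvPass s k < s.length := by
  exact pvPassF_lt hR

-- ---- the grouped target list ----
theorem pvFlat_succ (s : List (String × List (String × Option String))) (t : Nat) :
    pvFlat s (t+1) = pvFlat s t ++ pvGroup s (t+1) := by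
  simp [pvFlat, List.range_succ]

theorem mem_pvFlat {s : List (String × List (String × Option String))}
    {kv : String × List (String × Option String)} {t : Nat} :
    kv ∈ pvFlat s t ↔ kv ∈ s ∧ pvPass s kv.1 ≤ t := by
  simp only [pvFlat, pvGroup, List.mem_flatMap, List.mem_range, List.mem_filter,
    decide_eq_true_eq, Nat.lt_succ_iff, pvPass]
  constructor
  · rintro ⟨u, hu, hm, he⟩
    exact ⟨hm, he ▸ hu⟩
  · rintro ⟨hm, hle⟩
    exact ⟨pvPassF s s.length kv.1, hle, hm, rfl⟩

theorem key_mem_pvFlat {s : List (String × List (String × Option String))} {k : String} {t : Nat} :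
    k ∈ (pvFlat s t).map Prod.fst ↔ ∃ v, (k, v) ∈ s ∧ pvPass s k ≤ t := by
  simp only [List.mem_map]
  constructor
  · rintro ⟨kv, hkv, rfl⟩
    obtain ⟨hm, hle⟩ := mem_pvFlat.mp hkv
    exact ⟨kv.2, hm, hle⟩
  · rintro ⟨v, hm, hle⟩
    exact ⟨(k, v), mem_pvFlat.mpr ⟨hm, hle⟩, rfl⟩

theorem pvFlat_perm_filter (s : List (String × List (String × Option String))) (t : Nat) :
    (pvFlat s t).Perm (s.filter (fun kv => decide (pvPass s kv.1 ≤ t))) := by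
  induction t with
  | zero =>
    have h0 : pvFlat s 0 = pvGroup s 0 := by simp [pvFlat]
    have : pvGroup s 0 = s.filter (fun kv => decide (pvPass s kv.1 ≤ 0)) := by
      exact List.filter_congr (fun kv _ => by simp only [pvPass, decide_eq_decide]; omega)
    rw [h0, this]
  | succ t ih =>
    rw [pvFlat_succ]
    have h1 : (pvFlat s t ++ pvGroup s (t+1)).Perm
        ((s.filter (fun kv => decide (pvPass s kv.1 ≤ t))) ++ pvGroup s (t+1)) :=
      ih.append_right _
    refine h1.trans ?_
    have h2 := List.filter_append_perm (fun kv => decide (pvPass s kv.1 ≤ t))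
      (s.filter (fun kv => decide (pvPass s kv.1 ≤ t+1)))
    have e1 : (s.filter (fun kv => decide (pvPass s kv.1 ≤ t+1))).filter
        (fun kv => decide (pvPass s kv.1 ≤ t)) = s.filter (fun kv => decide (pvPass s kv.1 ≤ t)) := by
      rw [List.filter_filter]
      refine List.filter_congr (fun kv _ => ?_)
      by_cases h1 : pvPassF s s.length kv.1 ≤ t <;>
        by_cases h2 : pvPassF s s.length kv.1 ≤ t + 1 <;>
        simp [pvPass, h1, h2] <;> omega
    have e2 : (s.filter (fun kv => decide (pvPass s kv.1 ≤ t+1))).filter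
        (fun kv => !decide (pvPass s kv.1 ≤ t)) = pvGroup s (t+1) := by
      rw [List.filter_filter]
      refine List.filter_congr (fun kv _ => ?_)
      show (!decide (pvPass s kv.1 ≤ t) && decide (pvPass s kv.1 ≤ t + 1))
          = decide (pvPassF s s.length kv.1 = t + 1)
      by_cases h1 : pvPassF s s.length kv.1 ≤ t <;>
        by_cases h2 : pvPassF s s.length kv.1 ≤ t + 1 <;>
        simp [pvPass, h1, h2] <;> omega
    rw [e1, e2] at h2
    exact h2

theorem pvFlat_full {s : List (String × List (String × Option String))} {a b : Nat}
    (h : ∀ kv ∈ s, pvPass s kv.1 ≤ a) (hab : a ≤ b) : pvFlat s b = pvFlat s a := by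
  obtain ⟨d, rfl⟩ := Nat.le.dest hab
  induction d with
  | zero => rfl
  | succ d ih =>
    have : a + (d + 1) = (a + d) + 1 := by omega
    rw [this, pvFlat_succ, ih (by omega)]
    have : pvGroup s (a + d + 1) = [] := by
      rw [pvGroup, List.filter_eq_nil_iff]
      intro kv hkv
      have := h kv hkv
      simp only [pvPass] at this
      simp only [decide_eq_true_eq]
      omega
    simp [this]

-- ---- positions ----
theorem pvIdxN_concat {s pre rest : List (String × List (String × Option String))}
    {k : String} {v : List (String × Option String)}
    (hnd : (s.map Prod.fst).Nodup) (hs : s = pre ++ (k, v) :: rest) :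
    pvIdxN s k = pre.length := by
  subst hs
  have hnotk : k ∉ pre.map Prod.fst := by
    simp only [List.map_append, List.map_cons, List.nodup_append] at hnd
    intro hk
    exact hnd.2.2 k hk k (List.mem_cons_self ..) rfl
  unfold pvIdxN
  rw [List.map_append, List.map_cons, List.idxOf_append, if_neg hnotk,
    List.idxOf_cons_self]
  simp

theorem pvIdxN_lt_iff {s pre rest : List (String × List (String × Option String))}
    {k p : String} {v : List (String × Option String)}
    (hnd : (s.map Prod.fst).Nodup) (hs : s = pre ++ (k, v) :: rest)
    (hp : p ∈ s.map Prod.fst) :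
    p ∈ pre.map Prod.fst ↔ pvIdxN s p < pre.length := by
  subst hs
  unfold pvIdxN
  rw [List.map_append, List.map_cons, List.idxOf_append]
  constructor
  · intro hmem
    rw [if_pos hmem]
    have := List.idxOf_lt_length_iff.mpr hmem
    simpa using this
  · intro hlt
    by_contra hmem
    rw [if_neg hmem] at hlt
    rw [List.length_map] at hlt
    omega

-- ---- small bridges for the ports' containers ----
theorem dict_contains_mk_iff {V : Type} (L : List (String × V)) (x : String) :
    (PySem.Dict.mk L).contains x = true ↔ x ∈ L.map Prod.fst := by
  simp [PySem.Dict.contains, List.any_eq_true, List.mem_map]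

theorem set_contains_iff (L : List String) (x : String) :
    PySem.Set.contains L x = true ↔ x ∈ L := by
  simp [PySem.Set.contains]

theorem dict_insert_fresh {V : Type} {L : List (String × V)} {k : String} {v : V}
    (hk : k ∉ L.map Prod.fst) :
    (PySem.Dict.mk L).insert k v = PySem.Dict.mk (L ++ [(k, v)]) := by
  have hc : (PySem.Dict.mk L).contains k = false := by
    rw [← Bool.not_eq_true, dict_contains_mk_iff]; exact hk
  exact PySem.Dict.ext (by rw [PySem.Dict.items_insert_of_not_contains _ _ hc])

theorem state_step_fresh {V : Type} {L : List (String × V)} {k : String} {v : V}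
    (hk : k ∉ L.map Prod.fst) :
    ((PySem.Dict.mk L).insert k v, PySem.Set.add (L.map Prod.fst) k)
      = (PySem.Dict.mk (L ++ [(k, v)]), (L ++ [(k, v)]).map Prod.fst) := by
  have hs : PySem.Set.contains (L.map Prod.fst) k = false := by
    rw [← Bool.not_eq_true, set_contains_iff]; exact hk
  refine Prod.ext (dict_insert_fresh hk) ?_
  show PySem.Set.add (L.map Prod.fst) k = _
  rw [PySem.Set.add, hs]
  simp

-- key membership in the grouped prefix list
theorem key_mem_filter_iff {l : List (String × List (String × Option String))}
    {P : String × List (String × Option String) → Bool} {p : String} :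
    p ∈ (l.filter P).map Prod.fst ↔ ∃ v, (p, v) ∈ l ∧ P (p, v) = true := by
  simp only [List.mem_map, List.mem_filter]
  constructor
  · rintro ⟨kv, ⟨hm, hP⟩, rfl⟩
    exact ⟨kv.2, hm, hP⟩
  · rintro ⟨v, hm, hP⟩
    exact ⟨(p, v), ⟨hm, hP⟩, rfl⟩

-- ---- A's first loop builds exactly group 0 ----
theorem init_fold_aux (s : List (String × List (String × Option String)))
    (hnd : (s.map Prod.fst).Nodup)
    (hroot : ∀ kv ∈ s, pvRootedF s s.length kv.1 = true) :
    ∀ (rest pre : List (String × List (String × Option String))), s = pre ++ rest →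
    rest.foldl (fun st kv => if pvParent kv.2 = none then
        (st.1.insert kv.1 kv.2, PySem.Set.add st.2 kv.1) else st)
      (PySem.Dict.mk (pre.filter (fun kv => decide (pvPass s kv.1 = 0))),
       (pre.filter (fun kv => decide (pvPass s kv.1 = 0))).map Prod.fst)
    = (PySem.Dict.mk (s.filter (fun kv => decide (pvPass s kv.1 = 0))),
       (s.filter (fun kv => decide (pvPass s kv.1 = 0))).map Prod.fst) := by
  intro rest
  induction rest with
  | nil =>
    intro pre hs
    rw [List.append_nil] at hs
    subst hs
    rfl
  | cons kv rest ih =>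
    intro pre hs
    have hmem : kv ∈ s := by rw [hs]; simp
    have hkey : kv.1 ∈ s.map Prod.fst := List.mem_map_of_mem hmem
    have hlk : pvLookup s kv.1 = some kv.2 := pvLookup_of_mem hnd hmem
    have hfilter_app : ∀ (b : Bool), (pre ++ [kv]).filter (fun kv' => decide (pvPass s kv'.1 = 0))
        = pre.filter (fun kv' => decide (pvPass s kv'.1 = 0))
          ++ (if decide (pvPass s kv.1 = 0) = true then [kv] else []) := by
      intro _
      rw [List.filter_append]
      simp [List.filter_cons]
    have hnotpre : kv.1 ∉ pre.map Prod.fst := by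
      rw [hs, List.map_append, List.map_cons, List.nodup_append] at hnd
      intro hk
      exact hnd.2.2 kv.1 hk kv.1 (List.mem_cons_self ..) rfl
    rw [List.foldl_cons]
    by_cases hc : pvParent kv.2 = none
    · have hpar : pvPar s kv.1 = none := by simp [pvPar, hlk, hc]
      have hp0 : pvPass s kv.1 = 0 := pvPass_root hkey hpar
      rw [if_pos hc]
      have hfresh : kv.1 ∉ (pre.filter (fun kv' => decide (pvPass s kv'.1 = 0))).map Prod.fst := by
        intro hk
        obtain ⟨v, hv, _⟩ := key_mem_filter_iff.mp hk
        exact hnotpre (List.mem_map.mpr ⟨(kv.1, v), hv, rfl⟩)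
      have := state_step_fresh (v := kv.2) hfresh
      rw [this]
      have : pre.filter (fun kv' => decide (pvPass s kv'.1 = 0)) ++ [(kv.1, kv.2)]
          = (pre ++ [kv]).filter (fun kv' => decide (pvPass s kv'.1 = 0)) := by
        rw [hfilter_app true]
        simp [hp0]
      rw [this]
      exact ih (pre ++ [kv]) (by rw [hs]; simp)
    · obtain ⟨p, hp⟩ := Option.ne_none_iff_exists'.mp hc
      have hpar : pvPar s kv.1 = some p := by simp [pvPar, hlk, hp]
      have hR : pvRootedF s s.length kv.1 = true := hroot kv hmem
      have hpc := pvPass_child hR hpar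
      have hpne : pvPass s kv.1 ≠ 0 := by
        rcases hpc.2 with h
        split at h <;> omega
      rw [if_neg hc]
      have : pre.filter (fun kv' => decide (pvPass s kv'.1 = 0))
          = (pre ++ [kv]).filter (fun kv' => decide (pvPass s kv'.1 = 0)) := by
        rw [hfilter_app true]
        simp [hpne]
      rw [this]
      exact ih (pre ++ [kv]) (by rw [hs]; simp)

-- ---- one while-loop scan of A promotes the state from level t to level t+1 ----
theorem pass_fold_aux (s : List (String × List (String × Option String)))
    (hnd : (s.map Prod.fst).Nodup)
    (hroot : ∀ kv ∈ s, pvRootedF s s.length kv.1 = true) (t : Nat) :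
    ∀ (rest pre : List (String × List (String × Option String))), s = pre ++ rest →
    rest.foldl (fun st kv =>
      if (!(PySem.Set.contains st.2 kv.1)) &&
         (match pvParent kv.2 with
          | some p => st.1.contains p
          | none => false) then
        (st.1.insert kv.1 kv.2, PySem.Set.add st.2 kv.1)
      else st)
      (PySem.Dict.mk (pvFlat s t ++ pre.filter (fun kv => decide (pvPass s kv.1 = t+1))),
       (pvFlat s t ++ pre.filter (fun kv => decide (pvPass s kv.1 = t+1))).map Prod.fst)
    = (PySem.Dict.mk (pvFlat s (t+1)), (pvFlat s (t+1)).map Prod.fst) := by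
  intro rest
  induction rest with
  | nil =>
    intro pre hs
    rw [List.append_nil] at hs
    subst hs
    rw [pvFlat_succ]
    rfl
  | cons kv rest ih =>
    intro pre hs
    have hmem : kv ∈ s := by rw [hs]; simp
    have hkey : kv.1 ∈ s.map Prod.fst := List.mem_map_of_mem hmem
    have hlk : pvLookup s kv.1 = some kv.2 := pvLookup_of_mem hnd hmem
    have hR : pvRootedF s s.length kv.1 = true := hroot kv hmem
    have hnotpre : kv.1 ∉ pre.map Prod.fst := by
      rw [hs, List.map_append, List.map_cons, List.nodup_append] at hnd
      intro hk
      exact hnd.2.2 kv.1 hk kv.1 (List.mem_cons_self ..) rfl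
    set F : String × List (String × Option String) → Bool :=
      fun kv' => decide (pvPass s kv'.1 = t+1) with hF
    set L : List (String × List (String × Option String)) := pvFlat s t ++ pre.filter F with hL
    have hkeyL : ∀ x : String, x ∈ L.map Prod.fst ↔
        (∃ v, (x, v) ∈ s ∧ pvPass s x ≤ t) ∨ (x ∈ pre.map Prod.fst ∧ pvPass s x = t+1) := by
      intro x
      rw [hL, List.map_append, List.mem_append, key_mem_pvFlat, key_mem_filter_iff]
      constructor
      · rintro (h | ⟨v, hv, hP⟩)
        · exact Or.inl h
        · exact Or.inr ⟨List.mem_map_of_mem hv, by simpa [hF] using hP⟩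
      · rintro (h | ⟨hx, hP⟩)
        · exact Or.inl h
        · obtain ⟨xv, hxv, hfst⟩ := List.mem_map.mp hx
          exact Or.inr ⟨xv.2, by rw [← hfst]; simpa using hxv, by simp [hF, hfst, hP]⟩
    have hmemL : kv.1 ∈ L.map Prod.fst ↔ pvPass s kv.1 ≤ t := by
      rw [hkeyL]
      constructor
      · rintro (⟨v, _, hle⟩ | ⟨hpre, _⟩)
        · exact hle
        · exact absurd hpre hnotpre
      · intro hle
        exact Or.inl ⟨kv.2, hmem, hle⟩
    have hfilter_app : (pre ++ [kv]).filter F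
        = pre.filter F ++ (if F kv = true then [kv] else []) := by
      rw [List.filter_append]
      simp [List.filter_cons]
    rw [List.foldl_cons]
    by_cases hle : pvPass s kv.1 ≤ t
    · -- already added in an earlier pass: the membership test fails
      have hcontains : PySem.Set.contains (L.map Prod.fst) kv.1 = true :=
        (set_contains_iff _ _).mpr (hmemL.mpr hle)
      have hcond : (!(PySem.Set.contains (L.map Prod.fst) kv.1) &&
          (match pvParent kv.2 with
           | some p => (PySem.Dict.mk L).contains p
           | none => false)) = false := by
        rw [hcontains]; simp
      rw [if_neg (by rw [hcond]; simp)]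
      have hdrop : pre.filter F = (pre ++ [kv]).filter F := by
        rw [hfilter_app]
        have : F kv = false := by simp [hF]; omega
        simp [this]
      rw [hL, hdrop]
      exact ih (pre ++ [kv]) (by rw [hs]; simp)
    · have hnc : PySem.Set.contains (L.map Prod.fst) kv.1 = false := by
        rw [← Bool.not_eq_true, set_contains_iff]
        intro h
        exact hle (hmemL.mp h)
      cases hc : pvPar s kv.1 with
      | none =>
        have : pvPass s kv.1 = 0 := pvPass_root hkey hc
        omega
      | some p =>
        have hcv : pvParent kv.2 = some p := by
          simp only [pvPar, hlk] at hc
          exact hc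
        obtain ⟨hRp, hpass⟩ := pvPass_child hR hc
        have hpkey : p ∈ s.map Prod.fst := key_mem_of_rooted hRp
        have hcontp : (PySem.Dict.mk L).contains p = true ↔
            (pvPass s p ≤ t ∨ (pvPass s p = t+1 ∧ p ∈ pre.map Prod.fst)) := by
          rw [dict_contains_mk_iff, hkeyL]
          constructor
          · rintro (⟨v, _, hle'⟩ | ⟨hp1, hp2⟩)
            · exact Or.inl hle'
            · exact Or.inr ⟨hp2, hp1⟩
          · rintro (hle' | ⟨hp1, hp2⟩)
            · obtain ⟨xv, hxv, hfst⟩ := List.mem_map.mp hpkey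
              exact Or.inl ⟨xv.2, by rw [← hfst]; simpa using hxv, hle'⟩
            · exact Or.inr ⟨hp2, hp1⟩
        have hidxk : pvIdxN s kv.1 = pre.length := pvIdxN_concat hnd (by rw [hs])
        have hidxp_iff : p ∈ pre.map Prod.fst ↔ pvIdxN s p < pre.length :=
          pvIdxN_lt_iff hnd (by rw [hs]) hpkey
        by_cases hpt : pvPass s p ≤ t ∨ (pvPass s p = t+1 ∧ p ∈ pre.map Prod.fst)
        · -- the parent is already in new_dict: kv is inserted in this pass
          have hcontp_true : (PySem.Dict.mk L).contains p = true := hcontp.mpr hpt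
          have hcond : (!(PySem.Set.contains (L.map Prod.fst) kv.1) &&
              (match pvParent kv.2 with
               | some p => (PySem.Dict.mk L).contains p
               | none => false)) = true := by
            have hm2 : (match pvParent kv.2 with
                | some p' => (PySem.Dict.mk L).contains p'
                | none => false) = true := by
              simp only [hcv]
              exact hcontp_true
            rw [hnc, hm2]
            rfl
          rw [if_pos hcond]
          have hpassk : pvPass s kv.1 = t + 1 := by
            rcases hpt with hle' | ⟨hp1, hp2⟩
            · have h := hpass
              split at h <;> omega
            · have hlt : pvIdxN s p < pre.length := hidxp_iff.mp hp2
              rw [if_neg (by rw [hidxk]; omega)] at hpass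
              omega
          have hfresh : kv.1 ∉ L.map Prod.fst := fun h => hle (hmemL.mp h)
          have hstep := state_step_fresh (v := kv.2) hfresh
          rw [hstep]
          have hresh : L ++ [(kv.1, kv.2)] = pvFlat s t ++ (pre ++ [kv]).filter F := by
            rw [hL, hfilter_app, if_pos (by simp [hF]; omega)]
            simp
          rw [hresh]
          exact ih (pre ++ [kv]) (by rw [hs]; simp)
        · -- the parent is not yet in new_dict: kv is skipped in this pass
          push_neg at hpt
          have hcontp_false : (PySem.Dict.mk L).contains p = false := by
            rw [← Bool.not_eq_true, hcontp]
            push_neg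
            exact ⟨hpt.1, fun h1 => hpt.2 h1⟩
          have hcond : (!(PySem.Set.contains (L.map Prod.fst) kv.1) &&
              (match pvParent kv.2 with
               | some p => (PySem.Dict.mk L).contains p
               | none => false)) = false := by
            simp [hcv, hcontp_false]
          rw [if_neg (by rw [hcond]; simp)]
          have hppge : t + 1 ≤ pvPass s p := by omega
          have hpassne : pvPass s kv.1 ≠ t + 1 := by
            by_cases hp1 : pvPass s p = t + 1
            · have hnp : p ∉ pre.map Prod.fst := hpt.2 hp1
              have hge : pvIdxN s p ≥ pre.length := by
                by_contra habs
                exact hnp (hidxp_iff.mpr (by omega))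
              rw [if_pos (by rw [hidxk]; omega)] at hpass
              omega
            · have h := hpass
              split at h <;> omega
          have hkeep : pre.filter F = (pre ++ [kv]).filter F := by
            rw [hfilter_app, if_neg (by simp [hF]; omega)]
            simp
          rw [hL, hkeep]
          exact ih (pre ++ [kv]) (by rw [hs]; simp)

theorem pass_fold (s : List (String × List (String × Option String)))
    (hnd : (s.map Prod.fst).Nodup)
    (hroot : ∀ kv ∈ s, pvRootedF s s.length kv.1 = true) (t : Nat) :
    reconfigurePass s (PySem.Dict.mk (pvFlat s t), (pvFlat s t).map Prod.fst)
      = (PySem.Dict.mk (pvFlat s (t+1)), (pvFlat s (t+1)).map Prod.fst) := by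
  have h := pass_fold_aux s hnd hroot t s [] (by simp)
  simpa [reconfigurePass] using h

theorem flat_eq_flat_len {s : List (String × List (String × Option String))}
    (hroot : ∀ kv ∈ s, pvRootedF s s.length kv.1 = true) (t : Nat)
    (hall : ∀ kv ∈ s, pvPass s kv.1 ≤ t) :
    pvFlat s t = pvFlat s s.length := by
  rcases le_total t s.length with h | h
  · exact (pvFlat_full hall h).symm
  · exact pvFlat_full (fun kv hkv => le_of_lt (pvPass_lt_length (hroot kv hkv))) h

theorem while_run (s : List (String × List (String × Option String)))
    (hnd : (s.map Prod.fst).Nodup)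
    (hroot : ∀ kv ∈ s, pvRootedF s s.length kv.1 = true) :
    ∀ (f t : Nat), (∀ kv ∈ s, pvPass s kv.1 < t + f) →
    reconfigureWhile s f (PySem.Dict.mk (pvFlat s t), (pvFlat s t).map Prod.fst)
      = (PySem.Dict.mk (pvFlat s s.length), (pvFlat s s.length).map Prod.fst) := by
  intro f
  induction f with
  | zero =>
    intro t hall
    have heq : pvFlat s t = pvFlat s s.length :=
      flat_eq_flat_len hroot t (fun kv h => le_of_lt (by simpa using hall kv h))
    rw [reconfigureWhile, heq]
  | succ f ih =>
    intro t hall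
    rw [reconfigureWhile]
    by_cases hcond : PySem.Set.len ((pvFlat s t).map Prod.fst) < (s.length : Int)
    · rw [if_pos hcond, pass_fold s hnd hroot t]
      exact ih (t+1) (fun kv h => by have := hall kv h; omega)
    · rw [if_neg hcond]
      have hlen : s.length ≤ (pvFlat s t).length := by
        simp only [PySem.Set.len, List.length_map, not_lt] at hcond
        exact_mod_cast hcond
      have hall2 : ∀ kv ∈ s, pvPass s kv.1 ≤ t := by
        have hfl : (pvFlat s t).length
            = (s.filter (fun kv => decide (pvPass s kv.1 ≤ t))).length :=
          (pvFlat_perm_filter s t).length_eq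
        have hle := List.length_filter_le (fun kv => decide (pvPass s kv.1 ≤ t)) s
        have h1 : (s.filter (fun kv => decide (pvPass s kv.1 ≤ t))).length = s.length := by
          omega
        intro kv hkv
        have := (List.length_filter_eq_length_iff.mp h1) kv hkv
        simpa using this
      rw [flat_eq_flat_len hroot t hall2]

theorem reconfigureA_eq (s : List (String × List (String × Option String)))
    (hnd : (s.map Prod.fst).Nodup)
    (hroot : ∀ kv ∈ s, pvRootedF s s.length kv.1 = true) :
    reconfigure s = pvFlat s s.length := by
  have hinit : s.foldl (fun st kv => if pvParent kv.2 = none then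
        (st.1.insert kv.1 kv.2, PySem.Set.add st.2 kv.1) else st)
      ((PySem.Dict.empty : PySem.Dict String (List (String × Option String))),
       (PySem.Set.empty : PySem.Set String))
      = (PySem.Dict.mk (pvFlat s 0), (pvFlat s 0).map Prod.fst) := by
    have h := init_fold_aux s hnd hroot s [] (by simp)
    have hflat0 : pvFlat s 0 = s.filter (fun kv => decide (pvPass s kv.1 = 0)) := by
      simp [pvFlat]
      rfl
    rw [hflat0]
    exact h
  show (reconfigureWhile s (s.length + 1) _).1.items = _
  rw [hinit, while_run s hnd hroot (s.length + 1) 0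
    (fun kv hkv => by have := pvPass_lt_length (hroot kv hkv); omega)]

-- ---- B side: the init loop splits s into group 0 and the pending list ----
theorem alt_init_aux (s : List (String × List (String × Option String)))
    (hnd : (s.map Prod.fst).Nodup)
    (hroot : ∀ kv ∈ s, pvRootedF s s.length kv.1 = true) :
    ∀ (rest pre : List (String × List (String × Option String))), s = pre ++ rest →
    rest.foldl (fun st kv => if pvParent kv.2 = none then
        (st.1.insert kv.1 kv.2, st.2) else (st.1, st.2 ++ [kv]))
      (PySem.Dict.mk (pre.filter (fun kv => decide (pvPass s kv.1 = 0))),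
       pre.filter (fun kv => decide (0 < pvPass s kv.1)))
    = (PySem.Dict.mk (s.filter (fun kv => decide (pvPass s kv.1 = 0))),
       s.filter (fun kv => decide (0 < pvPass s kv.1))) := by
  intro rest
  induction rest with
  | nil =>
    intro pre hs
    rw [List.append_nil] at hs
    subst hs
    rfl
  | cons kv rest ih =>
    intro pre hs
    have hmem : kv ∈ s := by rw [hs]; simp
    have hkey : kv.1 ∈ s.map Prod.fst := List.mem_map_of_mem hmem
    have hlk : pvLookup s kv.1 = some kv.2 := pvLookup_of_mem hnd hmem
    have hnotpre : kv.1 ∉ pre.map Prod.fst := by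
      rw [hs, List.map_append, List.map_cons, List.nodup_append] at hnd
      intro hk
      exact hnd.2.2 kv.1 hk kv.1 (List.mem_cons_self ..) rfl
    rw [List.foldl_cons]
    by_cases hc : pvParent kv.2 = none
    · have hpar : pvPar s kv.1 = none := by simp [pvPar, hlk, hc]
      have hp0 : pvPass s kv.1 = 0 := pvPass_root hkey hpar
      rw [if_pos hc]
      have hfresh : kv.1 ∉ (pre.filter (fun kv' => decide (pvPass s kv'.1 = 0))).map Prod.fst := by
        intro hk
        obtain ⟨v, hv, _⟩ := key_mem_filter_iff.mp hk
        exact hnotpre (List.mem_map.mpr ⟨(kv.1, v), hv, rfl⟩)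
      rw [dict_insert_fresh (v := kv.2) hfresh]
      have h1 : pre.filter (fun kv' => decide (pvPass s kv'.1 = 0)) ++ [(kv.1, kv.2)]
          = (pre ++ [kv]).filter (fun kv' => decide (pvPass s kv'.1 = 0)) := by
        rw [List.filter_append]
        simp [List.filter_cons, hp0]
      have h2 : pre.filter (fun kv' => decide (0 < pvPass s kv'.1))
          = (pre ++ [kv]).filter (fun kv' => decide (0 < pvPass s kv'.1)) := by
        rw [List.filter_append]
        simp [List.filter_cons, hp0]
      rw [h1, h2]
      exact ih (pre ++ [kv]) (by rw [hs]; simp)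
    · obtain ⟨p, hp⟩ := Option.ne_none_iff_exists'.mp hc
      have hpar : pvPar s kv.1 = some p := by simp [pvPar, hlk, hp]
      have hR : pvRootedF s s.length kv.1 = true := hroot kv hmem
      have hpc := pvPass_child hR hpar
      have hpne : 0 < pvPass s kv.1 := by
        rcases hpc.2 with h
        split at h <;> omega
      rw [if_neg hc]
      have h1 : pre.filter (fun kv' => decide (pvPass s kv'.1 = 0))
          = (pre ++ [kv]).filter (fun kv' => decide (pvPass s kv'.1 = 0)) := by
        rw [List.filter_append]
        simp [List.filter_cons]
        omega
      have h2 : pre.filter (fun kv' => decide (0 < pvPass s kv'.1)) ++ [kv]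
          = (pre ++ [kv]).filter (fun kv' => decide (0 < pvPass s kv'.1)) := by
        rw [List.filter_append]
        simp [List.filter_cons, hpne]
      rw [h1, h2]
      exact ih (pre ++ [kv]) (by rw [hs]; simp)

-- ---- B side: one worklist round promotes the state from level t to level t+1 ----
theorem alt_pass_aux (s : List (String × List (String × Option String)))
    (hnd : (s.map Prod.fst).Nodup)
    (hroot : ∀ kv ∈ s, pvRootedF s s.length kv.1 = true) (t : Nat) :
    ∀ (rest pre : List (String × List (String × Option String))), s = pre ++ rest →
    (rest.filter (fun kv => decide (t < pvPass s kv.1))).foldl altStep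
      (PySem.Dict.mk (pvFlat s t ++ pre.filter (fun kv => decide (pvPass s kv.1 = t+1))),
       pre.filter (fun kv => decide (t+1 < pvPass s kv.1)))
    = (PySem.Dict.mk (pvFlat s (t+1)), s.filter (fun kv => decide (t+1 < pvPass s kv.1))) := by
  intro rest
  induction rest with
  | nil =>
    intro pre hs
    rw [List.append_nil] at hs
    subst hs
    rw [pvFlat_succ]
    rfl
  | cons kv rest ih =>
    intro pre hs
    have hmem : kv ∈ s := by rw [hs]; simp
    have hkey : kv.1 ∈ s.map Prod.fst := List.mem_map_of_mem hmem
    have hlk : pvLookup s kv.1 = some kv.2 := pvLookup_of_mem hnd hmem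
    have hR : pvRootedF s s.length kv.1 = true := hroot kv hmem
    have hnotpre : kv.1 ∉ pre.map Prod.fst := by
      rw [hs, List.map_append, List.map_cons, List.nodup_append] at hnd
      intro hk
      exact hnd.2.2 kv.1 hk kv.1 (List.mem_cons_self ..) rfl
    set F : String × List (String × Option String) → Bool :=
      fun kv' => decide (pvPass s kv'.1 = t+1) with hF
    set G : String × List (String × Option String) → Bool :=
      fun kv' => decide (t+1 < pvPass s kv'.1) with hG
    set L : List (String × List (String × Option String)) := pvFlat s t ++ pre.filter F with hL
    have hkeyL : ∀ x : String, x ∈ L.map Prod.fst ↔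
        (∃ v, (x, v) ∈ s ∧ pvPass s x ≤ t) ∨ (x ∈ pre.map Prod.fst ∧ pvPass s x = t+1) := by
      intro x
      rw [hL, List.map_append, List.mem_append, key_mem_pvFlat, key_mem_filter_iff]
      constructor
      · rintro (h | ⟨v, hv, hP⟩)
        · exact Or.inl h
        · exact Or.inr ⟨List.mem_map_of_mem hv, by simpa [hF] using hP⟩
      · rintro (h | ⟨hx, hP⟩)
        · exact Or.inl h
        · obtain ⟨xv, hxv, hfst⟩ := List.mem_map.mp hx
          exact Or.inr ⟨xv.2, by rw [← hfst]; simpa using hxv, by simp [hF, hfst, hP]⟩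
    have hFapp : (pre ++ [kv]).filter F
        = pre.filter F ++ (if F kv = true then [kv] else []) := by
      rw [List.filter_append]
      simp [List.filter_cons]
    have hGapp : (pre ++ [kv]).filter G
        = pre.filter G ++ (if G kv = true then [kv] else []) := by
      rw [List.filter_append]
      simp [List.filter_cons]
    rw [List.filter_cons]
    by_cases hle : pvPass s kv.1 ≤ t
    · -- already placed before this round: kv is not on the worklist
      rw [if_neg (by simp; omega)]
      have h1 : pre.filter F = (pre ++ [kv]).filter F := by
        rw [hFapp, if_neg (by simp [hF]; omega)]
        simp
      have h2 : pre.filter G = (pre ++ [kv]).filter G := by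
        rw [hGapp, if_neg (by simp [hG]; omega)]
        simp
      rw [hL, h1, h2]
      exact ih (pre ++ [kv]) (by rw [hs]; simp)
    · rw [if_pos (by simp; omega), List.foldl_cons]
      cases hc : pvPar s kv.1 with
      | none =>
        have : pvPass s kv.1 = 0 := pvPass_root hkey hc
        omega
      | some p =>
        have hcv : pvParent kv.2 = some p := by
          simp only [pvPar, hlk] at hc
          exact hc
        obtain ⟨hRp, hpass⟩ := pvPass_child hR hc
        have hpkey : p ∈ s.map Prod.fst := key_mem_of_rooted hRp
        have hcontp : (PySem.Dict.mk L).contains p = true ↔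
            (pvPass s p ≤ t ∨ (pvPass s p = t+1 ∧ p ∈ pre.map Prod.fst)) := by
          rw [dict_contains_mk_iff, hkeyL]
          constructor
          · rintro (⟨v, _, hle'⟩ | ⟨hp1, hp2⟩)
            · exact Or.inl hle'
            · exact Or.inr ⟨hp2, hp1⟩
          · rintro (hle' | ⟨hp1, hp2⟩)
            · obtain ⟨xv, hxv, hfst⟩ := List.mem_map.mp hpkey
              exact Or.inl ⟨xv.2, by rw [← hfst]; simpa using hxv, hle'⟩
            · exact Or.inr ⟨hp2, hp1⟩
        have hidxk : pvIdxN s kv.1 = pre.length := pvIdxN_concat hnd (by rw [hs])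
        have hidxp_iff : p ∈ pre.map Prod.fst ↔ pvIdxN s p < pre.length :=
          pvIdxN_lt_iff hnd (by rw [hs]) hpkey
        by_cases hpt : pvPass s p ≤ t ∨ (pvPass s p = t+1 ∧ p ∈ pre.map Prod.fst)
        · -- the parent is already in result: kv is placed this round
          have hcontp_true : (PySem.Dict.mk L).contains p = true := hcontp.mpr hpt
          have hpassk : pvPass s kv.1 = t + 1 := by
            rcases hpt with hle' | ⟨hp1, hp2⟩
            · have h := hpass
              split at h <;> omega
            · have hlt : pvIdxN s p < pre.length := hidxp_iff.mp hp2
              rw [if_neg (by rw [hidxk]; omega)] at hpass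
              omega
          have hfresh : kv.1 ∉ L.map Prod.fst := by
            rw [hkeyL]
            rintro (⟨v, _, hle'⟩ | ⟨hpre, _⟩)
            · omega
            · exact hnotpre hpre
          have hstep : altStep (PySem.Dict.mk L, pre.filter G) kv
              = ((PySem.Dict.mk L).insert kv.1 kv.2, pre.filter G) := by
            simp only [altStep, hcv, hcontp_true, if_pos]
          rw [hstep, dict_insert_fresh (v := kv.2) hfresh]
          have h1 : L ++ [(kv.1, kv.2)] = pvFlat s t ++ (pre ++ [kv]).filter F := by
            rw [hL, hFapp, if_pos (by simp [hF]; omega)]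
            simp
          have h2 : pre.filter G = (pre ++ [kv]).filter G := by
            rw [hGapp, if_neg (by simp [hG]; omega)]
            simp
          rw [h1, h2]
          exact ih (pre ++ [kv]) (by rw [hs]; simp)
        · -- the parent is not yet in result: kv stays pending
          push_neg at hpt
          have hcontp_false : (PySem.Dict.mk L).contains p = false := by
            rw [← Bool.not_eq_true, hcontp]
            push_neg
            exact ⟨hpt.1, fun h1 => hpt.2 h1⟩
          have hppge : t + 1 ≤ pvPass s p := by omega
          have hpassk : t + 1 < pvPass s kv.1 := by
            have hne : pvPass s kv.1 ≠ t + 1 := by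
              by_cases hp1 : pvPass s p = t + 1
              · have hnp : p ∉ pre.map Prod.fst := hpt.2 hp1
                have hge : pvIdxN s p ≥ pre.length := by
                  by_contra habs
                  exact hnp (hidxp_iff.mpr (by omega))
                rw [if_pos (by rw [hidxk]; omega)] at hpass
                omega
              · have h := hpass
                split at h <;> omega
            omega
          have hstep : altStep (PySem.Dict.mk L, pre.filter G) kv
              = (PySem.Dict.mk L, pre.filter G ++ [kv]) := by
            simp only [altStep, hcv, hcontp_false]
            simp
          rw [hstep]
          have h1 : L = pvFlat s t ++ (pre ++ [kv]).filter F := by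
            rw [hL, hFapp, if_neg (by simp [hF]; omega)]
            simp
          have h2 : pre.filter G ++ [kv] = (pre ++ [kv]).filter G := by
            rw [hGapp, if_pos (by simp [hG]; omega)]
          rw [h1, h2]
          exact ih (pre ++ [kv]) (by rw [hs]; simp)

-- ---- B side: running the worklist loop to completion ----
theorem alt_while_run (s : List (String × List (String × Option String)))
    (hnd : (s.map Prod.fst).Nodup)
    (hroot : ∀ kv ∈ s, pvRootedF s s.length kv.1 = true) :
    ∀ (f t : Nat), (∀ kv ∈ s, pvPass s kv.1 < t + f) →
    altWhile f (PySem.Dict.mk (pvFlat s t), s.filter (fun kv => decide (t < pvPass s kv.1)))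
      = PySem.Dict.mk (pvFlat s s.length) := by
  intro f
  induction f with
  | zero =>
    intro t hall
    have heq : pvFlat s t = pvFlat s s.length :=
      flat_eq_flat_len hroot t (fun kv h => le_of_lt (by simpa using hall kv h))
    rw [altWhile, heq]
  | succ f ih =>
    intro t hall
    rw [altWhile]
    by_cases hemp : s.filter (fun kv => decide (t < pvPass s kv.1)) = []
    · rw [if_pos hemp]
      have hall2 : ∀ kv ∈ s, pvPass s kv.1 ≤ t := by
        intro kv hkv
        have := List.filter_eq_nil_iff.mp hemp kv hkv
        simp at this
        omega
      rw [flat_eq_flat_len hroot t hall2]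
    · rw [if_neg hemp]
      have hpass := alt_pass_aux s hnd hroot t s [] (by simp)
      simp only [List.filter_nil, List.append_nil] at hpass
      rw [hpass]
      exact ih (t+1) (fun kv h => by have := hall kv h; omega)

theorem reconfigureB_eq (s : List (String × List (String × Option String)))
    (hnd : (s.map Prod.fst).Nodup)
    (hroot : ∀ kv ∈ s, pvRootedF s s.length kv.1 = true) :
    reconfigure_alt s = pvFlat s s.length := by
  have hinit : s.foldl (fun st kv => if pvParent kv.2 = none then
        (st.1.insert kv.1 kv.2, st.2) else (st.1, st.2 ++ [kv]))
      ((PySem.Dict.empty : PySem.Dict String (List (String × Option String))),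
       ([] : List (String × List (String × Option String))))
      = (PySem.Dict.mk (pvFlat s 0), s.filter (fun kv => decide (0 < pvPass s kv.1))) := by
    have h := alt_init_aux s hnd hroot s [] (by simp)
    have hflat0 : pvFlat s 0 = s.filter (fun kv => decide (pvPass s kv.1 = 0)) := by
      simp [pvFlat]
      rfl
    rw [hflat0]
    exact h
  show (altWhile (s.length + 1) _).items = _
  rw [hinit, alt_while_run s hnd hroot (s.length + 1) 0
    (fun kv hkv => by have := pvPass_lt_length (hroot kv hkv); omega)]

-- ===== VERDICT (by name: the statement is the Claim_ definition above) =====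
theorem reconfigure_spec : Claim_equal_reconfigure := by
  intro s _ hpre
  obtain ⟨hnd, _, hroot⟩ := hpre
  show reconfigure s = reconfigure_alt s
  rw [reconfigureA_eq s hnd hroot, reconfigureB_eq s hnd hroot]
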